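-- pv_equiv track=rewrite | github.com/LLR-ILD/EPS-HEP2021 | code/plot_scripts/presel_e2e2.py | get_latex
-- ===== SOURCE A (Python) =====
-- def get_latex(string):
--     """Quick fix for nicer figure texts."""
--     for normal, latex in {
--         "m_z": "$M_Z$",
--         "m_recoil": r"$M_{\mathrm{recoil}}$",
--         "abs(cos_theta_z)": "$| \\mathrm{cos} \\theta_Z |$",
--         "abs(cos_theta_miss)": "$| \\mathrm{cos} \\theta_{\\mathrm{miss}} |$",
--         "abs(cos_theta_z - cos_theta_miss)": "$| \\mathrm{cos} \\theta_Z - \\mathrm{cos} \\theta_{\\mathrm{miss}} |$",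
--         "cos_theta_z": "$\\mathrm{cos} \\theta_Z$",
--         "cos_theta_miss": "$\\mathrm{cos} \\theta_{\\mathrm{miss}}$",
--     }.items():
--         if normal in string:
--             string = string.replace(normal, latex)
--     return string
-- ===== SOURCE B (Python) =====
-- import re
--
-- _MAPPING = {
--     "m_z": "$M_Z$",
--     "m_recoil": r"$M_{\mathrm{recoil}}$",
--     "abs(cos_theta_z)": "$| \\mathrm{cos} \\theta_Z |$",
--     "abs(cos_theta_miss)": "$| \\mathrm{cos} \\theta_{\\mathrm{miss}} |$",
--     "abs(cos_theta_z - cos_theta_miss)": "$| \\mathrm{cos} \\theta_Z - \\mathrm{cos} \\theta_{\\mathrm{miss}} |$",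
--     "cos_theta_z": "$\\mathrm{cos} \\theta_Z$",
--     "cos_theta_miss": "$\\mathrm{cos} \\theta_{\\mathrm{miss}}$",
-- }
-- _PATTERN = re.compile("|".join(re.escape(key) for key in _MAPPING))
--
--
-- def get_latex(string):
--     """Quick fix for nicer figure texts."""
--     return _PATTERN.sub(lambda m: _MAPPING[m.group(0)], string)
-- ===== Notes on version B (the rewrite author's own statement) =====
-- stated objective: idiomatic
-- what changed: A makes up to seven full-string str.replace passes in dict order; B compiles one regex alternation of the same escaped keys in the same order and rewrites the string in a single left-to-right re.sub pass (equal because the keys are mutually prefix-free/overlap-free in the listed priority order and the LaTeX values cannot create or extend matches).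
import Mathlib
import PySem

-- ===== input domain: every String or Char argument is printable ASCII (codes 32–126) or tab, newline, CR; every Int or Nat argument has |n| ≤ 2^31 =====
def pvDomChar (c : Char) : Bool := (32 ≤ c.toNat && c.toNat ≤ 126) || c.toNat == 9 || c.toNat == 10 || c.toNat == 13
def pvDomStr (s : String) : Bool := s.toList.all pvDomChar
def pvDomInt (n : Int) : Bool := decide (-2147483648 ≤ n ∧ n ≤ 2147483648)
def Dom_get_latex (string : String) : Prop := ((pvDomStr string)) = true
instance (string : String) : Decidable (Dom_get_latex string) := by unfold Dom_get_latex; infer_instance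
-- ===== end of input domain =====

-- B replaces A's seven sequential str.replace passes by ONE left-to-right scan with a compiled
-- regex alternation of the same literal keys in the same order (re.sub); same return value.

-- ===== PORT A =====
-- the dict literal of A, as an association list in insertion order
def pvItems : List (String × String) :=
  [("m_z", "$M_Z$"),
   ("m_recoil", "$M_{\\mathrm{recoil}}$"),
   ("abs(cos_theta_z)", "$| \\mathrm{cos} \\theta_Z |$"),
   ("abs(cos_theta_miss)", "$| \\mathrm{cos} \\theta_{\\mathrm{miss}} |$"),
   ("abs(cos_theta_z - cos_theta_miss)", "$| \\mathrm{cos} \\theta_Z - \\mathrm{cos} \\theta_{\\mathrm{miss}} |$"),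
   ("cos_theta_z", "$\\mathrm{cos} \\theta_Z$"),
   ("cos_theta_miss", "$\\mathrm{cos} \\theta_{\\mathrm{miss}}$")]

-- for normal, latex in {...}.items(): if normal in string: string = string.replace(normal, latex)
def get_latex (string : String) : String :=
  pvItems.foldl
    (fun s kv => if PySem.Str.isIn kv.1 s then PySem.Str.replace s kv.1 kv.2 else s)
    string

-- ===== PORT B =====
-- the same mapping over List Char: the regex pattern's alternatives, in pattern order
def pvKeymap : List (List Char × List Char) :=
  [("m_z".toList, "$M_Z$".toList),
   ("m_recoil".toList, "$M_{\\mathrm{recoil}}$".toList),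
   ("abs(cos_theta_z)".toList, "$| \\mathrm{cos} \\theta_Z |$".toList),
   ("abs(cos_theta_miss)".toList, "$| \\mathrm{cos} \\theta_{\\mathrm{miss}} |$".toList),
   ("abs(cos_theta_z - cos_theta_miss)".toList, "$| \\mathrm{cos} \\theta_Z - \\mathrm{cos} \\theta_{\\mathrm{miss}} |$".toList),
   ("cos_theta_z".toList, "$\\mathrm{cos} \\theta_Z$".toList),
   ("cos_theta_miss".toList, "$\\mathrm{cos} \\theta_{\\mathrm{miss}}$".toList)]

-- first alternative of the pattern that matches at the current position (re alternation order)
def pvTryKeys (K : List (List Char × List Char)) (s : List Char) : Option (List Char × List Char) :=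
  match K with
  | [] => none
  | kv :: K' => if kv.1.isPrefixOf s then some kv else pvTryKeys K' s

-- pattern.sub(lambda m: mapping[m.group(0)], string): one left-to-right scan; at each position the
-- first alternative that matches is replaced and the scan resumes after it.  Hand port of re.sub,
-- exact for this pattern of escaped literals (re tries alternatives in order, leftmost match wins).
def pvScan (K : List (List Char × List Char)) : List Char → List Char
  | [] => []
  | c :: t =>
    match pvTryKeys K (c :: t) with
    | none => c :: pvScan K t
    | some kv =>
      if kv.1.length ≤ 1 then kv.2 ++ pvScan K t          -- totality guard; all keys have length ≥ 2
      else kv.2 ++ pvScan K ((c :: t).drop kv.1.length)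
termination_by s => s.length
decreasing_by
  · simp
  · simp only [List.length_drop, List.length_cons]; omega

def get_latex_alt (string : String) : String :=
  String.ofList (pvScan pvKeymap string.toList)

-- ===== PRECONDITION & SPEC =====
def Spec_get_latex (string : String) (out : String) : Prop := out = get_latex_alt string
instance (string : String) (out : String) : Decidable (Spec_get_latex string out) := by unfold Spec_get_latex; infer_instance

-- ===== CLAIM (what is proved, stated in full; the proofs are below) =====
def Claim_equal_get_latex : Prop := ∀ (string : String), Dom_get_latex string → Spec_get_latex string (get_latex string)

-- ===== LEMMAS AND PROOFS =====

-- Boolean side conditions on the literal keys/values (each instance is checked by `decide`):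
-- no key of K is a prefix of another key of K
def pvPFB (K : List (List Char × List Char)) : Bool :=
  match K with
  | [] => true
  | kv :: K' => K'.all (fun b => !(kv.1.isPrefixOf b.1) && !(b.1.isPrefixOf kv.1)) && pvPFB K'

-- p never matches strictly inside an occurrence of q (no overlap of p with a proper suffix of q)
def pvOverlapFreeB (p q : List Char) : Bool :=
  (List.range q.length).all
    (fun j => j == 0 || (!(p.isPrefixOf (q.drop j)) && !((q.drop j).isPrefixOf p)))

-- q never matches starting inside the inserted value v
def pvCompatB (v q : List Char) : Bool :=
  (List.range v.length).all
    (fun i => !((v.drop i).isPrefixOf q) && !(q.isPrefixOf (v.drop i)))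

-- q never matches reaching into an inserted value v from the left
def pvSepB (v q : List Char) : Bool :=
  (List.range q.length).all
    (fun j => j == 0 || (!((q.drop j).isPrefixOf v) && !(v.isPrefixOf (q.drop j))))

theorem pv_prefix_or {q a b : List Char} (h : q <+: a ++ b) : q <+: a ∨ a <+: q :=
  List.prefix_or_prefix_of_prefix h (List.prefix_append a b)

theorem pvTryKeys_none_iff (K : List (List Char × List Char)) (s : List Char) :
    pvTryKeys K s = none ↔ ∀ kv ∈ K, ¬ (kv.1 <+: s) := by
  induction K with
  | nil => simp [pvTryKeys]
  | cons kv K' ih =>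
    by_cases h : kv.1.isPrefixOf s
    · simp [pvTryKeys, h, List.isPrefixOf_iff_prefix.mp h]
    · simp [pvTryKeys, h, ih]
      intro _
      exact fun hc => h (List.isPrefixOf_iff_prefix.mpr hc)

theorem pvTryKeys_some (K : List (List Char × List Char)) (s : List Char)
    (kv : List Char × List Char) (h : pvTryKeys K s = some kv) : kv ∈ K ∧ kv.1 <+: s := by
  induction K with
  | nil => simp [pvTryKeys] at h
  | cons kv' K' ih =>
    by_cases h' : kv'.1.isPrefixOf s
    · simp [pvTryKeys, h'] at h
      subst h
      exact ⟨List.mem_cons_self, List.isPrefixOf_iff_prefix.mp h'⟩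
    · simp [pvTryKeys, h'] at h
      obtain ⟨hm, hp⟩ := ih h
      exact ⟨List.mem_cons_of_mem _ hm, hp⟩

-- the first match of s is still the first match of q ++ Y when q is that match (keys prefix-free)
theorem pvTryKeys_append (K : List (List Char × List Char)) (s Y : List Char)
    (q w : List Char) (h : pvTryKeys K s = some (q, w)) (hpf : pvPFB K = true) :
    pvTryKeys K (q ++ Y) = some (q, w) := by
  induction K with
  | nil => simp [pvTryKeys] at h
  | cons kv K' ih =>
    simp only [pvPFB, Bool.and_eq_true, List.all_eq_true] at hpf
    by_cases h' : kv.1.isPrefixOf s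
    · simp [pvTryKeys, h'] at h
      subst h
      simp [pvTryKeys, List.isPrefixOf_iff_prefix.mpr (List.prefix_append q Y)]
    · simp only [pvTryKeys, h'] at h
      have hmem := (pvTryKeys_some K' s (q, w) h).1
      have hni := hpf.1 _ hmem
      simp only [Bool.not_eq_true'] at hni
      have hkv : kv.1.isPrefixOf (q ++ Y) = false := by
        by_contra hc
        have : kv.1 <+: q ++ Y :=
          List.isPrefixOf_iff_prefix.mp (by revert hc; cases kv.1.isPrefixOf (q ++ Y) <;> simp)
        rcases pv_prefix_or this with hp | hp
        · exact absurd (List.isPrefixOf_iff_prefix.mpr hp) (by simp [hni.1])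
        · exact absurd (List.isPrefixOf_iff_prefix.mpr hp) (by simp [hni.2])
      simp [pvTryKeys, hkv, ih h hpf.2]

theorem pvScan_nil (K : List (List Char × List Char)) : pvScan K [] = [] := by
  simp [pvScan]

theorem pvScan_nomatch (K : List (List Char × List Char)) (c : Char) (t : List Char)
    (h : pvTryKeys K (c :: t) = none) : pvScan K (c :: t) = c :: pvScan K t := by
  rw [pvScan, h]

theorem pvScan_match (K : List (List Char × List Char)) (s : List Char)
    (kv : List Char × List Char) (h : pvTryKeys K s = some kv) (hk : kv.1 ≠ []) (hs : s ≠ []) :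
    pvScan K s = kv.2 ++ pvScan K (s.drop kv.1.length) := by
  obtain ⟨c, t, rfl⟩ := List.exists_cons_of_ne_nil hs
  rw [pvScan, h]
  by_cases hl : kv.1.length ≤ 1
  · have h1 : kv.1.length = 1 := by
      have : kv.1.length ≠ 0 := by simpa using hk
      omega
    simp [h1]
  · simp [hl]

-- the scan never matches inside a freshly inserted value: scanning v ++ X copies v unchanged
theorem pvScan_append (K : List (List Char × List Char)) :
    ∀ (v X : List Char),
      (∀ i < v.length, ∀ kv ∈ K, ¬ (v.drop i <+: kv.1) ∧ ¬ (kv.1 <+: v.drop i)) →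
      pvScan K (v ++ X) = v ++ pvScan K X := by
  intro v
  induction v with
  | nil => intro X _; simp
  | cons c v' ih =>
    intro X hc
    have h0 := fun kv hm => hc 0 (by simp) kv hm
    simp only [List.drop_zero] at h0
    have hnone : pvTryKeys K ((c :: v') ++ X) = none := by
      rw [pvTryKeys_none_iff]
      intro kv hm hpre
      rcases pv_prefix_or hpre with hp | hp
      · exact (h0 kv hm).2 hp
      · exact (h0 kv hm).1 hp
    rw [List.cons_append, pvScan_nomatch K c (v' ++ X) (by simpa using hnone)]
    rw [ih X (fun i hi kv hm => by simpa using hc (i + 1) (by simpa using hi) kv hm)]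
    simp

-- a single-key scan copies any p-match-free stretch of n characters verbatim
theorem pvScan_copy (p v : List Char) :
    ∀ (n : ℕ) (s : List Char), n ≤ s.length → (∀ j < n, ¬ p <+: s.drop j) →
      pvScan [(p, v)] s = s.take n ++ pvScan [(p, v)] (s.drop n) := by
  intro n
  induction n with
  | zero => intro s _ _; simp
  | succ n ih =>
    intro s hn hj
    obtain ⟨c, t, rfl⟩ := List.exists_cons_of_ne_nil (l := s) (by rintro rfl; simp at hn)
    have h0 : ¬ p <+: c :: t := by simpa using hj 0 (by omega)
    have hb : p.isPrefixOf (c :: t) = false := by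
      rw [Bool.eq_false_iff]; exact fun h => h0 (List.isPrefixOf_iff_prefix.mp h)
    have hnone : pvTryKeys [(p, v)] (c :: t) = none := by
      simp [pvTryKeys, hb]
    rw [pvScan_nomatch _ _ _ hnone,
        ih t (by simpa using hn) (fun j hjn => by simpa using hj (j + 1) (by omega))]
    simp

-- replacing p by v creates no new match of q (q absent before ⇒ q absent after), given pvSep
theorem pvScan_no_new (p v q : List Char) (hp0 : p ≠ [])
    (hse : ∀ j, 0 < j → j < q.length → ¬ (q.drop j <+: v) ∧ ¬ (v <+: q.drop j)) :
    ∀ (s : List Char) (j : ℕ), j < q.length → ¬ (q.drop j <+: s) → (j = 0 → ¬ p <+: s) →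
      ¬ (q.drop j <+: pvScan [(p, v)] s) := by
  intro s
  induction s with
  | nil =>
    intro j hj habs _ hc
    rw [pvScan] at hc
    have := List.prefix_nil.mp hc
    have : q.length ≤ j := by
      have := congrArg List.length this
      simp at this
      omega
    omega
  | cons c t ih =>
    intro j hj hns hj0 hc
    by_cases hp : p.isPrefixOf (c :: t)
    · -- p matches here: the scan emits v; a proper suffix of q cannot align with v
      have hj1 : 0 < j := by
        rcases Nat.eq_zero_or_pos j with rfl | h
        · exact absurd (List.isPrefixOf_iff_prefix.mp hp) (hj0 rfl)
        · exact h
      have hsome : pvTryKeys [(p, v)] (c :: t) = some (p, v) := by simp [pvTryKeys, hp]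
      rw [pvScan_match _ _ _ hsome hp0 (by simp)] at hc
      rcases pv_prefix_or hc with h | h
      · exact (hse j hj1 hj).1 h
      · exact (hse j hj1 hj).2 h
    · have hb : p.isPrefixOf (c :: t) = false := Bool.eq_false_iff.mpr hp
      have hnone : pvTryKeys [(p, v)] (c :: t) = none := by simp [pvTryKeys, hb]
      rw [pvScan_nomatch _ _ _ hnone] at hc
      have hdq : q.drop j = q[j] :: q.drop (j + 1) := List.drop_eq_getElem_cons hj
      rw [hdq, List.cons_prefix_cons] at hc
      obtain ⟨hch, htail⟩ := hc
      by_cases hj1 : j + 1 < q.length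
      · -- descend one character
        have : ¬ (q.drop (j + 1) <+: t) := by
          intro h
          exact hns (by rw [hdq, hch]; exact List.cons_prefix_cons.mpr ⟨rfl, h⟩)
        exact ih (j + 1) hj1 this (by omega) htail
      · -- j + 1 = q.length: q.drop j = [q[j]] and it IS a prefix of s, contradiction
        have hd : q.drop (j + 1) = [] := List.drop_eq_nil_of_le (by omega)
        exact hns (by rw [hdq, hch, hd]; exact List.cons_prefix_cons.mpr ⟨rfl, List.nil_prefix⟩)

theorem pvOverlapFreeB_spec (p q : List Char) (h : pvOverlapFreeB p q = true) :
    ∀ j, 0 < j → j < q.length → ¬ (p <+: q.drop j) ∧ ¬ (q.drop j <+: p) := by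
  intro j hj0 hj
  have := (List.all_eq_true.mp h) j (List.mem_range.mpr hj)
  simp only [beq_iff_eq, Bool.or_eq_true, Bool.and_eq_true, Bool.not_eq_true'] at this
  rcases this with h0 | ⟨h1, h2⟩
  · omega
  · exact ⟨fun hc => by simp [List.isPrefixOf_iff_prefix.mpr hc] at h1,
           fun hc => by simp [List.isPrefixOf_iff_prefix.mpr hc] at h2⟩

theorem pvCompatB_spec (v q : List Char) (h : pvCompatB v q = true) :
    ∀ i < v.length, ¬ (v.drop i <+: q) ∧ ¬ (q <+: v.drop i) := by
  intro i hi
  have := (List.all_eq_true.mp h) i (List.mem_range.mpr hi)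
  simp only [Bool.and_eq_true, Bool.not_eq_true'] at this
  exact ⟨fun hc => by simp [List.isPrefixOf_iff_prefix.mpr hc] at this,
         fun hc => by simp [List.isPrefixOf_iff_prefix.mpr hc] at this⟩

theorem pvSepB_spec (v q : List Char) (h : pvSepB v q = true) :
    ∀ j, 0 < j → j < q.length → ¬ (q.drop j <+: v) ∧ ¬ (v <+: q.drop j) := by
  intro j hj0 hj
  have := (List.all_eq_true.mp h) j (List.mem_range.mpr hj)
  simp only [beq_iff_eq, Bool.or_eq_true, Bool.and_eq_true, Bool.not_eq_true'] at this
  rcases this with h0 | ⟨h1, h2⟩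
  · omega
  · exact ⟨fun hc => by simp [List.isPrefixOf_iff_prefix.mpr hc] at h1,
           fun hc => by simp [List.isPrefixOf_iff_prefix.mpr hc] at h2⟩

-- MASTER LEMMA: scanning with (p, v) :: ps equals replacing p everywhere first, then scanning
-- with ps — the heart of "sequential replaces = one prioritized scan"
theorem pvScan_cons (p v : List Char) (ps : List (List Char × List Char))
    (hp : p ≠ [])
    (hps : ∀ kv ∈ ps, kv.1 ≠ [])
    (hpf : pvPFB ps = true)
    (hov : ∀ kv ∈ ps, pvOverlapFreeB p kv.1 = true)
    (hco : ∀ kv ∈ ps, pvCompatB v kv.1 = true)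
    (hse : ∀ kv ∈ ps, pvSepB v kv.1 = true) :
    ∀ s, pvScan ((p, v) :: ps) s = pvScan ps (pvScan [(p, v)] s) := by
  have H : ∀ (n : ℕ) (s : List Char), s.length ≤ n →
      pvScan ((p, v) :: ps) s = pvScan ps (pvScan [(p, v)] s) := by
    intro n
    induction n with
    | zero =>
      intro s hs
      have : s = [] := List.eq_nil_of_length_eq_zero (by omega)
      subst this
      simp [pvScan_nil]
    | succ n ih =>
      intro s hs
      rcases List.eq_nil_or_concat' s with rfl | _
      · simp [pvScan_nil]
      have hsne : s ≠ [] := by rename_i h; obtain ⟨_, _, rfl⟩ := h; simp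
      by_cases hp1 : p.isPrefixOf s
      · -- CASE A: p matches at the front; both sides emit v, and the scan with ps
        -- cannot match inside the inserted v (pvCompatB)
        have hsome1 : pvTryKeys ((p, v) :: ps) s = some (p, v) := by simp [pvTryKeys, hp1]
        have hsomes : pvTryKeys [(p, v)] s = some (p, v) := by simp [pvTryKeys, hp1]
        rw [pvScan_match _ _ _ hsome1 hp hsne, pvScan_match _ _ _ hsomes hp hsne]
        rw [pvScan_append ps v _ (fun i hi kv hm => pvCompatB_spec v kv.1 (hco kv hm) i hi)]
        have hlen : (s.drop p.length).length ≤ n := by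
          have hple : p.length ≤ s.length := (List.isPrefixOf_iff_prefix.mp hp1).length_le
          have : 0 < p.length := List.length_pos_of_ne_nil hp
          simp only [List.length_drop]; omega
        rw [ih _ hlen]
      · have hb : p.isPrefixOf s = false := Bool.eq_false_iff.mpr hp1
        match h2 : pvTryKeys ps s with
        | some (q, w) =>
          -- CASE B: a lower-priority key q is the first match; p cannot match inside the
          -- q occurrence (pvOverlapFreeB), so replacing p first leaves q in place
          obtain ⟨hqmem, hqpre⟩ := pvTryKeys_some ps s (q, w) h2
          have hqne : q ≠ [] := hps _ hqmem
          obtain ⟨s₂, rfl⟩ := hqpre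
          have hsome1 : pvTryKeys ((p, v) :: ps) (q ++ s₂) = some (q, w) := by
            simp [pvTryKeys, hb, h2]
          rw [pvScan_match _ _ _ hsome1 hqne hsne, List.drop_left]
          have hcopy : pvScan [(p, v)] (q ++ s₂) = q ++ pvScan [(p, v)] s₂ := by
            have hjfree : ∀ j < q.length, ¬ p <+: (q ++ s₂).drop j := by
              intro j hj hpc
              rcases Nat.eq_zero_or_pos j with rfl | hj0
              · exact hp1 (List.isPrefixOf_iff_prefix.mpr (by simpa using hpc))
              · rw [List.drop_append_of_le_length (le_of_lt hj)] at hpc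
                rcases pv_prefix_or hpc with hx | hx
                · exact ((pvOverlapFreeB_spec p q (hov _ hqmem)) j hj0 hj).1 hx
                · exact ((pvOverlapFreeB_spec p q (hov _ hqmem)) j hj0 hj).2 hx
            rw [pvScan_copy p v q.length (q ++ s₂) (by simp) hjfree]
            simp
          rw [hcopy]
          have hsome2 : pvTryKeys ps (q ++ pvScan [(p, v)] s₂) = some (q, w) :=
            pvTryKeys_append ps (q ++ s₂) _ q w h2 hpf
          rw [pvScan_match _ _ _ hsome2 hqne (by simp [hqne]), List.drop_left]
          have hq0 : 0 < q.length := List.length_pos_of_ne_nil hqne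
          have hlen : s₂.length ≤ n := by
            have := hs; simp only [List.length_append] at this; omega
          rw [ih _ hlen]
        | none =>
          -- CASE C: nothing matches at the front; replacing p in the tail creates no new
          -- match of any q at this position (pvSepB)
          obtain ⟨c, t, rfl⟩ := List.exists_cons_of_ne_nil (l := s) hsne
          have hnone1 : pvTryKeys ((p, v) :: ps) (c :: t) = none := by
            simp [pvTryKeys, hb, h2]
          have hnones : pvTryKeys [(p, v)] (c :: t) = none := by simp [pvTryKeys, hb]
          rw [pvScan_nomatch _ _ _ hnone1, pvScan_nomatch _ _ _ hnones]
          have habs := pvTryKeys_none_iff ps (c :: t) |>.mp h2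
          have hnone2 : pvTryKeys ps (c :: pvScan [(p, v)] t) = none := by
            rw [pvTryKeys_none_iff]
            intro kv hm hc
            have := pvScan_no_new p v kv.1 hp
              (pvSepB_spec v kv.1 (hse _ hm)) (c :: t) 0
              (List.length_pos_of_ne_nil (hps _ hm)) (by simpa using habs kv hm)
              (fun _ hx => hp1 (List.isPrefixOf_iff_prefix.mpr hx))
            rw [pvScan_nomatch _ _ _ hnones] at this
            exact this (by simpa using hc)
          rw [pvScan_nomatch _ _ _ hnone2, ih t (by simpa using hs)]
  exact fun s => H s.length s le_rfl

-- PySem's str.replace (nonempty pattern) IS the single-key scan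
theorem pv_go_spec (o n : List Char) (ho : o ≠ []) :
    ∀ (fuel : ℕ) (s acc : List Char), s.length ≤ fuel →
      PySem.Chars.replace.go o n fuel s acc = acc.reverse ++ pvScan [(o, n)] s := by
  intro fuel
  induction fuel with
  | zero =>
    intro s acc hs
    have : s = [] := List.eq_nil_of_length_eq_zero (by omega)
    subst this
    simp [PySem.Chars.replace.go, pvScan_nil]
  | succ m ih =>
    intro s acc hs
    rcases s with _ | ⟨c, t⟩
    · simp [PySem.Chars.replace.go, pvScan_nil]
    by_cases hp : o.isPrefixOf (c :: t)
    · have hsome : pvTryKeys [(o, n)] (c :: t) = some (o, n) := by simp [pvTryKeys, hp]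
      have hol : 0 < o.length := List.length_pos_of_ne_nil ho
      rw [show PySem.Chars.replace.go o n (m + 1) (c :: t) acc
            = PySem.Chars.replace.go o n m (List.drop o.length (c :: t)) (n.reverse ++ acc) by
          simp [PySem.Chars.replace.go, hp]]
      rw [ih _ _ (by simp only [List.length_drop, List.length_cons] at *; omega)]
      rw [pvScan_match _ _ _ hsome ho (by simp)]
      simp
    · have hb : o.isPrefixOf (c :: t) = false := Bool.eq_false_iff.mpr hp
      have hnone : pvTryKeys [(o, n)] (c :: t) = none := by simp [pvTryKeys, hb]
      rw [show PySem.Chars.replace.go o n (m + 1) (c :: t) acc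
            = PySem.Chars.replace.go o n m t (c :: acc) by
          simp [PySem.Chars.replace.go, hb]]
      rw [ih _ _ (by simpa using hs), pvScan_nomatch _ _ _ hnone]
      simp

theorem pv_replace_eq_scan (o n : List Char) (ho : o ≠ []) (s : List Char) :
    PySem.Chars.replace s o n = pvScan [(o, n)] s := by
  have he : o.isEmpty = false := by rcases o with _ | _ <;> simp_all
  rw [PySem.Chars.replace, he]
  simpa using pv_go_spec o n ho s.length s [] le_rfl

theorem pv_scan_id (o n s : List Char) (h : ¬ o <:+: s) : pvScan [(o, n)] s = s := by
  induction s with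
  | nil => simp [pvScan_nil]
  | cons c t ih =>
    have hnp : ¬ o <+: c :: t := fun hc => h hc.isInfix
    have hb : o.isPrefixOf (c :: t) = false :=
      Bool.eq_false_iff.mpr (fun hc => hnp (List.isPrefixOf_iff_prefix.mp hc))
    rw [pvScan_nomatch _ _ _ (by simp [pvTryKeys, hb]),
        ih (fun hc => h (List.infix_cons hc))]

-- one pass of A's loop body: the `in` guard is redundant (replace of an absent key is identity)
theorem pv_fold_step (o n : String) (ho : o.toList ≠ []) (x : String) :
    (if PySem.Str.isIn o x then PySem.Str.replace x o n else x)
      = String.ofList (pvScan [(o.toList, n.toList)] x.toList) := by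
  by_cases h : PySem.Str.isIn o x
  · rw [if_pos h, PySem.Str.replace, pv_replace_eq_scan _ _ ho]
  · have hin : PySem.Chars.isIn o.toList x.toList = false := by
      rw [Bool.eq_false_iff]; exact fun hc => h (by rw [PySem.Str.isIn]; exact hc)
    rw [if_neg h, pv_scan_id _ _ _ ((PySem.Chars.isIn_eq_false_iff _ _).mp hin),
        String.ofList_toList]

-- the one-pass ordered scan equals the seven sequential single-key scans
theorem pv_chain (l : List Char) :
    pvScan pvKeymap l =
      pvScan [("cos_theta_miss".toList, "$\\mathrm{cos} \\theta_{\\mathrm{miss}}$".toList)]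
        (pvScan [("cos_theta_z".toList, "$\\mathrm{cos} \\theta_Z$".toList)]
          (pvScan [("abs(cos_theta_z - cos_theta_miss)".toList, "$| \\mathrm{cos} \\theta_Z - \\mathrm{cos} \\theta_{\\mathrm{miss}} |$".toList)]
            (pvScan [("abs(cos_theta_miss)".toList, "$| \\mathrm{cos} \\theta_{\\mathrm{miss}} |$".toList)]
              (pvScan [("abs(cos_theta_z)".toList, "$| \\mathrm{cos} \\theta_Z |$".toList)]
                (pvScan [("m_recoil".toList, "$M_{\\mathrm{recoil}}$".toList)]
                  (pvScan [("m_z".toList, "$M_Z$".toList)] l)))))) := by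
  rw [show pvKeymap = ("m_z".toList, "$M_Z$".toList) :: _ from rfl]
  rw [pvScan_cons _ _ _ (by decide) (by decide) (by decide) (by decide) (by decide) (by decide)]
  rw [pvScan_cons _ _ _ (by decide) (by decide) (by decide) (by decide) (by decide) (by decide)]
  rw [pvScan_cons _ _ _ (by decide) (by decide) (by decide) (by decide) (by decide) (by decide)]
  rw [pvScan_cons _ _ _ (by decide) (by decide) (by decide) (by decide) (by decide) (by decide)]
  rw [pvScan_cons _ _ _ (by decide) (by decide) (by decide) (by decide) (by decide) (by decide)]
  rw [pvScan_cons _ _ _ (by decide) (by decide) (by decide) (by decide) (by decide) (by decide)]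

theorem pv_final (s : String) : get_latex s = get_latex_alt s := by
  simp only [get_latex, pvItems, List.foldl]
  rw [pv_fold_step _ _ (by decide), pv_fold_step _ _ (by decide), pv_fold_step _ _ (by decide),
      pv_fold_step _ _ (by decide), pv_fold_step _ _ (by decide), pv_fold_step _ _ (by decide),
      pv_fold_step _ _ (by decide)]
  simp only [String.toList_ofList]
  rw [get_latex_alt, pv_chain]

-- ===== VERDICT (by name: the statement is the Claim_ definition above) =====
theorem get_latex_spec : Claim_equal_get_latex := by
  intro s _
  show get_latex s = get_latex_alt s
  exact pv_final s
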